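-- pv_equiv track=rewrite | github.com/w85kramer/elections | scripts/analyze_tier3.py | is_nickname_pair
-- ===== SOURCE A (Python) =====
-- def is_nickname_pair(name1, name2):
--     """Check if first names are common nickname pairs."""
--     NICKNAMES = {
--         'william': {'bill', 'billy', 'will', 'willy'},
--         'robert': {'bob', 'bobby', 'rob', 'robby'},
--         'richard': {'rick', 'dick', 'rich'},
--         'james': {'jim', 'jimmy', 'jamie'},
--         'john': {'jack', 'johnny', 'jon'},
--         'joseph': {'joe', 'joey'},
--         'michael': {'mike', 'mikey'},
--         'thomas': {'tom', 'tommy'},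
--         'charles': {'charlie', 'chuck', 'chas'},
--         'edward': {'ed', 'eddie', 'ted', 'teddy'},
--         'elizabeth': {'liz', 'lizzy', 'beth', 'betty', 'eliza'},
--         'margaret': {'maggie', 'meg', 'peggy', 'marge', 'margie'},
--         'catherine': {'cathy', 'kate', 'kathy', 'cat', 'katie'},
--         'katherine': {'kathy', 'kate', 'katie', 'kat'},
--         'patricia': {'pat', 'patty', 'tricia'},
--         'jennifer': {'jen', 'jenny'},
--         'jessica': {'jess', 'jessie'},
--         'stephanie': {'steph'},
--         'christopher': {'chris'},
--         'nicholas': {'nick', 'nicky'},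
--         'timothy': {'tim', 'timmy'},
--         'stephen': {'steve', 'steven'},
--         'steven': {'steve', 'stephen'},
--         'daniel': {'dan', 'danny'},
--         'matthew': {'matt'},
--         'anthony': {'tony'},
--         'donald': {'don', 'donny'},
--         'kenneth': {'ken', 'kenny'},
--         'ronald': {'ron', 'ronny'},
--         'lawrence': {'larry'},
--         'raymond': {'ray'},
--         'gerald': {'jerry', 'gerry'},
--         'benjamin': {'ben'},
--         'samuel': {'sam'},
--         'deborah': {'deb', 'debbie', 'debby'},
--         'debra': {'deb', 'debbie', 'debby'},
--         'virginia': {'ginny', 'ginger'},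
--         'dorothy': {'dot', 'dottie'},
--         'barbara': {'barb', 'barbie'},
--         'alexander': {'alex'},
--         'alexandra': {'alex', 'lexi'},
--         'jonathan': {'jon', 'john'},
--         'nathaniel': {'nate', 'nathan'},
--         'nathan': {'nate'},
--         'phillip': {'phil'},
--         'zachary': {'zach', 'zack'},
--         'frederick': {'fred', 'freddy'},
--         'douglas': {'doug'},
--         'harold': {'hal', 'harry'},
--         'leonard': {'len', 'lenny'},
--         'arthur': {'art'},
--         'clifford': {'cliff'},
--         'russell': {'russ'},
--         'terrence': {'terry'},
--         'theresa': {'terry', 'tess'},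
--         'andrew': {'andy', 'drew'},
--         'gregory': {'greg'},
--         'jeffrey': {'jeff'},
--         'peter': {'pete'},
--         'walter': {'walt'},
--     }
--
--     f1 = name1.split()[0].lower() if name1.split() else ''
--     f2 = name2.split()[0].lower() if name2.split() else ''
--
--     if f1 == f2:
--         return True
--
--     # Check both directions
--     for canonical, nicks in NICKNAMES.items():
--         all_forms = {canonical} | nicks
--         if f1 in all_forms and f2 in all_forms:
--             return True
--
--     return False
-- ===== SOURCE B (Python) =====
-- # Precomputed inverted index: every name form (canonical or nickname) maps to the
-- # sorted list of ids of the nickname groups containing it; overlapping forms like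
-- # 'jon' or 'kate' map to several groups.
-- _GROUPS_OF = {
--     'william': [0],
--     'bill': [0],
--     'billy': [0],
--     'will': [0],
--     'willy': [0],
--     'robert': [1],
--     'bob': [1],
--     'bobby': [1],
--     'rob': [1],
--     'robby': [1],
--     'richard': [2],
--     'dick': [2],
--     'rich': [2],
--     'rick': [2],
--     'james': [3],
--     'jamie': [3],
--     'jim': [3],
--     'jimmy': [3],
--     'john': [4, 41],
--     'jack': [4],
--     'johnny': [4],
--     'jon': [4, 41],
--     'joseph': [5],
--     'joe': [5],
--     'joey': [5],
--     'michael': [6],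
--     'mike': [6],
--     'mikey': [6],
--     'thomas': [7],
--     'tom': [7],
--     'tommy': [7],
--     'charles': [8],
--     'charlie': [8],
--     'chas': [8],
--     'chuck': [8],
--     'edward': [9],
--     'ed': [9],
--     'eddie': [9],
--     'ted': [9],
--     'teddy': [9],
--     'elizabeth': [10],
--     'beth': [10],
--     'betty': [10],
--     'eliza': [10],
--     'liz': [10],
--     'lizzy': [10],
--     'margaret': [11],
--     'maggie': [11],
--     'marge': [11],
--     'margie': [11],
--     'meg': [11],
--     'peggy': [11],
--     'catherine': [12],
--     'cat': [12],
--     'cathy': [12],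
--     'kate': [12, 13],
--     'kathy': [12, 13],
--     'katie': [12, 13],
--     'katherine': [13],
--     'kat': [13],
--     'patricia': [14],
--     'pat': [14],
--     'patty': [14],
--     'tricia': [14],
--     'jennifer': [15],
--     'jen': [15],
--     'jenny': [15],
--     'jessica': [16],
--     'jess': [16],
--     'jessie': [16],
--     'stephanie': [17],
--     'steph': [17],
--     'christopher': [18],
--     'chris': [18],
--     'nicholas': [19],
--     'nick': [19],
--     'nicky': [19],
--     'timothy': [20],
--     'tim': [20],
--     'timmy': [20],
--     'stephen': [21, 22],
--     'steve': [21, 22],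
--     'steven': [21, 22],
--     'daniel': [23],
--     'dan': [23],
--     'danny': [23],
--     'matthew': [24],
--     'matt': [24],
--     'anthony': [25],
--     'tony': [25],
--     'donald': [26],
--     'don': [26],
--     'donny': [26],
--     'kenneth': [27],
--     'ken': [27],
--     'kenny': [27],
--     'ronald': [28],
--     'ron': [28],
--     'ronny': [28],
--     'lawrence': [29],
--     'larry': [29],
--     'raymond': [30],
--     'ray': [30],
--     'gerald': [31],
--     'gerry': [31],
--     'jerry': [31],
--     'benjamin': [32],
--     'ben': [32],
--     'samuel': [33],
--     'sam': [33],
--     'deborah': [34],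
--     'deb': [34, 35],
--     'debbie': [34, 35],
--     'debby': [34, 35],
--     'debra': [35],
--     'virginia': [36],
--     'ginger': [36],
--     'ginny': [36],
--     'dorothy': [37],
--     'dot': [37],
--     'dottie': [37],
--     'barbara': [38],
--     'barb': [38],
--     'barbie': [38],
--     'alexander': [39],
--     'alex': [39, 40],
--     'alexandra': [40],
--     'lexi': [40],
--     'jonathan': [41],
--     'nathaniel': [42],
--     'nate': [42, 43],
--     'nathan': [42, 43],
--     'phillip': [44],
--     'phil': [44],
--     'zachary': [45],
--     'zach': [45],
--     'zack': [45],
--     'frederick': [46],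
--     'fred': [46],
--     'freddy': [46],
--     'douglas': [47],
--     'doug': [47],
--     'harold': [48],
--     'hal': [48],
--     'harry': [48],
--     'leonard': [49],
--     'len': [49],
--     'lenny': [49],
--     'arthur': [50],
--     'art': [50],
--     'clifford': [51],
--     'cliff': [51],
--     'russell': [52],
--     'russ': [52],
--     'terrence': [53],
--     'terry': [53, 54],
--     'theresa': [54],
--     'tess': [54],
--     'andrew': [55],
--     'andy': [55],
--     'drew': [55],
--     'gregory': [56],
--     'greg': [56],
--     'jeffrey': [57],
--     'jeff': [57],
--     'peter': [58],
--     'pete': [58],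
--     'walter': [59],
--     'walt': [59],
-- }
--
--
-- def is_nickname_pair(name1, name2):
--     """Check if first names are common nickname pairs."""
--     f1 = name1.split()[0].lower() if name1.split() else ''
--     f2 = name2.split()[0].lower() if name2.split() else ''
--
--     if f1 == f2:
--         return True
--
--     g1 = _GROUPS_OF.get(f1)
--     g2 = _GROUPS_OF.get(f2)
--     return g1 is not None and g2 is not None and any(i in g2 for i in g1)
-- ===== Notes on version B (the rewrite author's own statement) =====
-- stated objective: idiomatic
-- what changed: B ships a precomputed inverted index (a literal dict mapping each of the 169 name forms to the list of ids of the nickname groups containing it) and answers each query with two dict lookups and an id-intersection test, instead of A's per-call scan over all 60 group sets.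
import Mathlib
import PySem

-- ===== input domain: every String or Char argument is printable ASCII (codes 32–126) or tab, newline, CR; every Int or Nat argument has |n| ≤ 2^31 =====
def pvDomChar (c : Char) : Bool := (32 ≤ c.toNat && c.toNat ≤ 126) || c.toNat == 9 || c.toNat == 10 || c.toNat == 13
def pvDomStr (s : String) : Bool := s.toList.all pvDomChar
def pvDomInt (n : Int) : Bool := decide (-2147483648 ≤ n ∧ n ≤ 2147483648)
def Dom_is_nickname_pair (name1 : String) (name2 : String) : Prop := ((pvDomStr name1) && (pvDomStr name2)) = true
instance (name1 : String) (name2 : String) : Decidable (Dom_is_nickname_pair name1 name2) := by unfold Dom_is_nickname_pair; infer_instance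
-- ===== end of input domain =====

-- B replaces A's per-call scan over all 60 nickname groups by a precomputed inverted index
-- (each name form -> list of ids of the groups containing it): two lookups and an
-- intersection test answer a query (objective: idiomatic).

-- ===== PORT A =====
-- the NICKNAMES table (a dict of sets in Python) as its association list of (canonical, nicknames)
def pvNickTable : List (String × PySem.Set String) := [
  ("william", PySem.Set.ofList ["bill", "billy", "will", "willy"]),
  ("robert", PySem.Set.ofList ["bob", "bobby", "rob", "robby"]),
  ("richard", PySem.Set.ofList ["rick", "dick", "rich"]),
  ("james", PySem.Set.ofList ["jim", "jimmy", "jamie"]),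
  ("john", PySem.Set.ofList ["jack", "johnny", "jon"]),
  ("joseph", PySem.Set.ofList ["joe", "joey"]),
  ("michael", PySem.Set.ofList ["mike", "mikey"]),
  ("thomas", PySem.Set.ofList ["tom", "tommy"]),
  ("charles", PySem.Set.ofList ["charlie", "chuck", "chas"]),
  ("edward", PySem.Set.ofList ["ed", "eddie", "ted", "teddy"]),
  ("elizabeth", PySem.Set.ofList ["liz", "lizzy", "beth", "betty", "eliza"]),
  ("margaret", PySem.Set.ofList ["maggie", "meg", "peggy", "marge", "margie"]),
  ("catherine", PySem.Set.ofList ["cathy", "kate", "kathy", "cat", "katie"]),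
  ("katherine", PySem.Set.ofList ["kathy", "kate", "katie", "kat"]),
  ("patricia", PySem.Set.ofList ["pat", "patty", "tricia"]),
  ("jennifer", PySem.Set.ofList ["jen", "jenny"]),
  ("jessica", PySem.Set.ofList ["jess", "jessie"]),
  ("stephanie", PySem.Set.ofList ["steph"]),
  ("christopher", PySem.Set.ofList ["chris"]),
  ("nicholas", PySem.Set.ofList ["nick", "nicky"]),
  ("timothy", PySem.Set.ofList ["tim", "timmy"]),
  ("stephen", PySem.Set.ofList ["steve", "steven"]),
  ("steven", PySem.Set.ofList ["steve", "stephen"]),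
  ("daniel", PySem.Set.ofList ["dan", "danny"]),
  ("matthew", PySem.Set.ofList ["matt"]),
  ("anthony", PySem.Set.ofList ["tony"]),
  ("donald", PySem.Set.ofList ["don", "donny"]),
  ("kenneth", PySem.Set.ofList ["ken", "kenny"]),
  ("ronald", PySem.Set.ofList ["ron", "ronny"]),
  ("lawrence", PySem.Set.ofList ["larry"]),
  ("raymond", PySem.Set.ofList ["ray"]),
  ("gerald", PySem.Set.ofList ["jerry", "gerry"]),
  ("benjamin", PySem.Set.ofList ["ben"]),
  ("samuel", PySem.Set.ofList ["sam"]),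
  ("deborah", PySem.Set.ofList ["deb", "debbie", "debby"]),
  ("debra", PySem.Set.ofList ["deb", "debbie", "debby"]),
  ("virginia", PySem.Set.ofList ["ginny", "ginger"]),
  ("dorothy", PySem.Set.ofList ["dot", "dottie"]),
  ("barbara", PySem.Set.ofList ["barb", "barbie"]),
  ("alexander", PySem.Set.ofList ["alex"]),
  ("alexandra", PySem.Set.ofList ["alex", "lexi"]),
  ("jonathan", PySem.Set.ofList ["jon", "john"]),
  ("nathaniel", PySem.Set.ofList ["nate", "nathan"]),
  ("nathan", PySem.Set.ofList ["nate"]),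
  ("phillip", PySem.Set.ofList ["phil"]),
  ("zachary", PySem.Set.ofList ["zach", "zack"]),
  ("frederick", PySem.Set.ofList ["fred", "freddy"]),
  ("douglas", PySem.Set.ofList ["doug"]),
  ("harold", PySem.Set.ofList ["hal", "harry"]),
  ("leonard", PySem.Set.ofList ["len", "lenny"]),
  ("arthur", PySem.Set.ofList ["art"]),
  ("clifford", PySem.Set.ofList ["cliff"]),
  ("russell", PySem.Set.ofList ["russ"]),
  ("terrence", PySem.Set.ofList ["terry"]),
  ("theresa", PySem.Set.ofList ["terry", "tess"]),
  ("andrew", PySem.Set.ofList ["andy", "drew"]),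
  ("gregory", PySem.Set.ofList ["greg"]),
  ("jeffrey", PySem.Set.ofList ["jeff"]),
  ("peter", PySem.Set.ofList ["pete"]),
  ("walter", PySem.Set.ofList ["walt"])]

-- f = name.split()[0].lower() if name.split() else ''   (identical line in A and B)
def pvFirstLower (name : String) : String :=
  match PySem.Str.split₀ name with
  | [] => ""
  | w :: _ => PySem.Str.lower w

-- A's 'for canonical, nicks in NICKNAMES.items(): …' with early return True
def pvNickLoop (f1 f2 : String) : List (String × PySem.Set String) → Bool
  | [] => false
  | (c, nicks) :: rest =>
      let all_forms : PySem.Set String := PySem.Set.union (PySem.Set.ofList [c]) nicks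
      if PySem.Set.contains all_forms f1 && PySem.Set.contains all_forms f2 then true
      else pvNickLoop f1 f2 rest

def is_nickname_pair (name1 : String) (name2 : String) : Bool :=
  let f1 := pvFirstLower name1
  let f2 := pvFirstLower name2
  if f1 == f2 then true
  else pvNickLoop f1 f2 pvNickTable

-- ===== PORT B =====
-- Source B's precomputed literal _GROUPS_OF: form -> ids of the groups containing it
def pvGroupsOf : PySem.Dict String (List Int) := PySem.Dict.mk [
  ("william", [0]),
  ("bill", [0]),
  ("billy", [0]),
  ("will", [0]),
  ("willy", [0]),
  ("robert", [1]),
  ("bob", [1]),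
  ("bobby", [1]),
  ("rob", [1]),
  ("robby", [1]),
  ("richard", [2]),
  ("dick", [2]),
  ("rich", [2]),
  ("rick", [2]),
  ("james", [3]),
  ("jamie", [3]),
  ("jim", [3]),
  ("jimmy", [3]),
  ("john", [4, 41]),
  ("jack", [4]),
  ("johnny", [4]),
  ("jon", [4, 41]),
  ("joseph", [5]),
  ("joe", [5]),
  ("joey", [5]),
  ("michael", [6]),
  ("mike", [6]),
  ("mikey", [6]),
  ("thomas", [7]),
  ("tom", [7]),
  ("tommy", [7]),
  ("charles", [8]),
  ("charlie", [8]),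
  ("chas", [8]),
  ("chuck", [8]),
  ("edward", [9]),
  ("ed", [9]),
  ("eddie", [9]),
  ("ted", [9]),
  ("teddy", [9]),
  ("elizabeth", [10]),
  ("beth", [10]),
  ("betty", [10]),
  ("eliza", [10]),
  ("liz", [10]),
  ("lizzy", [10]),
  ("margaret", [11]),
  ("maggie", [11]),
  ("marge", [11]),
  ("margie", [11]),
  ("meg", [11]),
  ("peggy", [11]),
  ("catherine", [12]),
  ("cat", [12]),
  ("cathy", [12]),
  ("kate", [12, 13]),
  ("kathy", [12, 13]),
  ("katie", [12, 13]),
  ("katherine", [13]),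
  ("kat", [13]),
  ("patricia", [14]),
  ("pat", [14]),
  ("patty", [14]),
  ("tricia", [14]),
  ("jennifer", [15]),
  ("jen", [15]),
  ("jenny", [15]),
  ("jessica", [16]),
  ("jess", [16]),
  ("jessie", [16]),
  ("stephanie", [17]),
  ("steph", [17]),
  ("christopher", [18]),
  ("chris", [18]),
  ("nicholas", [19]),
  ("nick", [19]),
  ("nicky", [19]),
  ("timothy", [20]),
  ("tim", [20]),
  ("timmy", [20]),
  ("stephen", [21, 22]),
  ("steve", [21, 22]),
  ("steven", [21, 22]),
  ("daniel", [23]),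
  ("dan", [23]),
  ("danny", [23]),
  ("matthew", [24]),
  ("matt", [24]),
  ("anthony", [25]),
  ("tony", [25]),
  ("donald", [26]),
  ("don", [26]),
  ("donny", [26]),
  ("kenneth", [27]),
  ("ken", [27]),
  ("kenny", [27]),
  ("ronald", [28]),
  ("ron", [28]),
  ("ronny", [28]),
  ("lawrence", [29]),
  ("larry", [29]),
  ("raymond", [30]),
  ("ray", [30]),
  ("gerald", [31]),
  ("gerry", [31]),
  ("jerry", [31]),
  ("benjamin", [32]),
  ("ben", [32]),
  ("samuel", [33]),
  ("sam", [33]),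
  ("deborah", [34]),
  ("deb", [34, 35]),
  ("debbie", [34, 35]),
  ("debby", [34, 35]),
  ("debra", [35]),
  ("virginia", [36]),
  ("ginger", [36]),
  ("ginny", [36]),
  ("dorothy", [37]),
  ("dot", [37]),
  ("dottie", [37]),
  ("barbara", [38]),
  ("barb", [38]),
  ("barbie", [38]),
  ("alexander", [39]),
  ("alex", [39, 40]),
  ("alexandra", [40]),
  ("lexi", [40]),
  ("jonathan", [41]),
  ("nathaniel", [42]),
  ("nate", [42, 43]),
  ("nathan", [42, 43]),
  ("phillip", [44]),
  ("phil", [44]),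
  ("zachary", [45]),
  ("zach", [45]),
  ("zack", [45]),
  ("frederick", [46]),
  ("fred", [46]),
  ("freddy", [46]),
  ("douglas", [47]),
  ("doug", [47]),
  ("harold", [48]),
  ("hal", [48]),
  ("harry", [48]),
  ("leonard", [49]),
  ("len", [49]),
  ("lenny", [49]),
  ("arthur", [50]),
  ("art", [50]),
  ("clifford", [51]),
  ("cliff", [51]),
  ("russell", [52]),
  ("russ", [52]),
  ("terrence", [53]),
  ("terry", [53, 54]),
  ("theresa", [54]),
  ("tess", [54]),
  ("andrew", [55]),
  ("andy", [55]),
  ("drew", [55]),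
  ("gregory", [56]),
  ("greg", [56]),
  ("jeffrey", [57]),
  ("jeff", [57]),
  ("peter", [58]),
  ("pete", [58]),
  ("walter", [59]),
  ("walt", [59])]

-- g1 is not None and g2 is not None and any(i in g2 for i in g1)
def is_nickname_pair_alt (name1 : String) (name2 : String) : Bool :=
  let f1 := pvFirstLower name1
  let f2 := pvFirstLower name2
  if f1 == f2 then true
  else
    match pvGroupsOf.get? f1, pvGroupsOf.get? f2 with
    | some g1, some g2 => g1.any (fun i => g2.contains i)
    | _, _ => false

-- ===== PRECONDITION & SPEC =====
def Spec_is_nickname_pair (name1 : String) (name2 : String) (out : Bool) : Prop := out = is_nickname_pair_alt name1 name2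
instance (name1 : String) (name2 : String) (out : Bool) : Decidable (Spec_is_nickname_pair name1 name2 out) := by unfold Spec_is_nickname_pair; infer_instance

-- ===== CLAIM (what is proved, stated in full; the proofs are below) =====
def Claim_equal_is_nickname_pair : Prop := ∀ (name1 : String) (name2 : String), Dom_is_nickname_pair name1 name2 → Spec_is_nickname_pair name1 name2 (is_nickname_pair name1 name2)

-- ===== LEMMAS AND PROOFS =====

-- the combined form set of a table entry
def pvForms (p : String × PySem.Set String) : PySem.Set String :=
  PySem.Set.union (PySem.Set.ofList [p.1]) p.2

-- the index entry B should hold for a form x, recomputed from A's table (proof-side only)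
def pvIdsOf (x : String) : List Int :=
  (List.range pvNickTable.length).filterMap
    (fun k => if x ∈ pvForms (pvNickTable.getD k ("", [])) then some ((k : Int)) else none)

-- total lookup in B's index
def pvIdxGet (x : String) : List Int := (pvGroupsOf.get? x).getD []

theorem pvNickLoop_iff (f1 f2 : String) (tbl : List (String × PySem.Set String)) :
    pvNickLoop f1 f2 tbl = true ↔ ∃ p ∈ tbl, f1 ∈ pvForms p ∧ f2 ∈ pvForms p := by
  induction tbl with
  | nil => simp [pvNickLoop]
  | cons q rest ih =>
      obtain ⟨c, nicks⟩ := q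
      simp only [pvNickLoop, List.mem_cons]
      split_ifs with h
      · simp only [Bool.and_eq_true, PySem.Set.contains_iff] at h
        simp only [true_iff]
        exact ⟨(c, nicks), Or.inl rfl, h.1, h.2⟩
      · rw [ih]
        constructor
        · rintro ⟨p, hp, h1, h2⟩; exact ⟨p, Or.inr hp, h1, h2⟩
        · rintro ⟨p, hp | hp, h1, h2⟩
          · exfalso; apply h
            subst hp
            simp only [Bool.and_eq_true, PySem.Set.contains_iff]
            exact ⟨h1, h2⟩
          · exact ⟨p, hp, h1, h2⟩

-- every entry of B's literal index carries exactly the ids the table prescribes for its key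
set_option maxRecDepth 100000 in
theorem pvIndexEntries :
    (pvGroupsOf.items.all (fun p => p.2 == pvIdsOf p.1)) = true := by decide

-- every form of the table is a key of B's literal index
set_option maxRecDepth 100000 in
theorem pvFormsCovered :
    ((List.range pvNickTable.length).all
      (fun k => (pvForms (pvNickTable.getD k ("", []))).all
        (fun f => pvGroupsOf.contains f))) = true := by decide

theorem pvIdxGet_eq (x : String) : pvIdxGet x = pvIdsOf x := by
  unfold pvIdxGet
  rcases h : pvGroupsOf.get? x with _ | v
  · -- x is not a key: no table entry may contain it
    simp only [Option.getD_none]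
    symm
    unfold pvIdsOf
    rw [List.filterMap_eq_nil_iff]
    intro k hk
    rw [List.mem_range] at hk
    rw [ite_eq_right_iff]
    intro hx
    have := List.all_eq_true.mp pvFormsCovered k (List.mem_range.mpr hk)
    have hcontains := List.all_eq_true.mp this x hx
    rw [PySem.Dict.get?_eq_none_iff_contains] at h
    simp [h] at hcontains
  · have hmem := PySem.Dict.mem_items_of_get?_eq_some pvGroupsOf h
    have := List.all_eq_true.mp pvIndexEntries _ hmem
    simpa using this

theorem pvIdsOf_mem (x : String) (j : Int) :
    j ∈ pvIdsOf x ↔ ∃ k, ∃ _ : k < pvNickTable.length, j = (k : Int) ∧ x ∈ pvForms pvNickTable[k] := by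
  unfold pvIdsOf
  simp only [List.mem_filterMap, List.mem_range, Option.ite_none_right_eq_some, Option.some_inj]
  constructor
  · rintro ⟨k, hk, hx, rfl⟩
    exact ⟨k, hk, rfl, by rwa [List.getD_eq_getElem _ _ hk] at hx⟩
  · rintro ⟨k, hk, rfl, hx⟩
    exact ⟨k, hk, by rwa [List.getD_eq_getElem _ _ hk], rfl⟩

theorem pvCore (f1 f2 : String) :
    pvNickLoop f1 f2 pvNickTable =
      (match pvGroupsOf.get? f1, pvGroupsOf.get? f2 with
        | some g1, some g2 => g1.any (fun i => g2.contains i)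
        | _, _ => false) := by
  have hbranch : (match pvGroupsOf.get? f1, pvGroupsOf.get? f2 with
        | some g1, some g2 => g1.any (fun i => g2.contains i)
        | _, _ => false)
      = (pvIdxGet f1).any (fun i => (pvIdxGet f2).contains i) := by
    unfold pvIdxGet
    rcases pvGroupsOf.get? f1 with _ | g1 <;> rcases pvGroupsOf.get? f2 with _ | g2 <;> simp
  rw [hbranch, Bool.eq_iff_iff, pvNickLoop_iff]
  simp only [List.any_eq_true, List.contains_iff_mem, pvIdxGet_eq, pvIdsOf_mem]
  constructor
  · rintro ⟨p, hp, h1, h2⟩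
    rw [List.mem_iff_getElem] at hp
    obtain ⟨k, hk, rfl⟩ := hp
    exact ⟨(k : Int), ⟨k, hk, rfl, h1⟩, ⟨k, hk, rfl, h2⟩⟩
  · rintro ⟨j, ⟨k, hk, hjk, h1⟩, ⟨k', hk', hjk', h2⟩⟩
    have hcast : (k : Int) = (k' : Int) := by rw [← hjk, hjk']
    have hkk : k = k' := by exact_mod_cast hcast
    subst hkk
    exact ⟨pvNickTable[k], List.getElem_mem hk, h1, h2⟩

-- ===== VERDICT (by name: the statement is the Claim_ definition above) =====
theorem is_nickname_pair_spec : Claim_equal_is_nickname_pair := by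
  intro name1 name2 _
  simp only [Spec_is_nickname_pair, is_nickname_pair, is_nickname_pair_alt]
  by_cases h : pvFirstLower name1 == pvFirstLower name2
  · rw [if_pos h, if_pos h]
  · rw [if_neg h, if_neg h]
    exact pvCore _ _
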